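-- pv_equiv track=rewrite | github.com/CYehLu/hurricane_tools | _gen_readme_document.py | parse_multi_line_doc
-- ===== SOURCE A (Python) =====
-- def parse_multi_line_doc(i, content):
--     """
--     parse multi line docstring of a function
--
--     input: i and content
--         content[i] = 'def func(args):\n'
--         content[i+1] = '\"""\n'   (triple quote)
--         content[i+2] = 'function description line 1\n'  -| (function description)  -|
--         content[i+3] = 'function description line 2\n'  -|                          |
--         content[i+4] = '\n'                                                         | (full doc)
--         contnet[i+5] = 'still docstring\n'              -|                          |
--         ...                                              | (addition part)          |
--         content[i+n] = 'last line of docstring\n'       -|                         -|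
--         content[i+n+1] = '\"""\n'
--         content[i+n+2] = '# function body start\n'
--     output: i+n+2, function description, and full docstring
--     """
--     tri_quote = '"""'
--     i = i + 2
--
--     func_descrpt = []
--     full_doc = []
--
--     # here is function description part
--     while content[i].strip() and content[i].strip() != tri_quote:
--         func_descrpt.append(content[i].strip())
--         full_doc.append(content[i])
--         i += 1
--
--     # check if has blank line, or has reached the triple quote
--     if not content[i].strip():
--         full_doc.append(content[i])
--         i += 1
--
--         # addition part (parameters, retruns, note, reference ... etc)
--         while content[i].strip() != tri_quote:
--             full_doc.append(content[i])
--             i += 1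
--
--         # now `i` is at the end triple quote of docstring
--         # convert `func_descrpt` and `full_doc` from list to string
--         func_descrpt = ' '.join(func_descrpt)
--         full_doc = ''.join(full_doc)
--
--         return i+1, func_descrpt, full_doc
--
--     else:
--         # reach triple quote -> docstring only has function description part
--         func_descrpt = ' '.join(func_descrpt)
--         full_doc = ''.join(full_doc)
--         return i+1, func_descrpt, full_doc
-- ===== SOURCE B (Python) =====
-- def parse_multi_line_doc(i, content):
--     """Single boundary-finding scan (j = closing quote, descr_end = first blank),
--     then two slices; replaces A's two append loops + branch."""
--     tri_quote = '"""'
--     start = i + 2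
--     j = start
--     descr_end = None
--     while content[j].strip() != tri_quote:
--         if descr_end is None and not content[j].strip():
--             descr_end = j
--         j += 1
--     if descr_end is None:
--         descr_end = j
--     func_descrpt = ' '.join(line.strip() for line in content[start:descr_end])
--     full_doc = ''.join(content[start:j])
--     return j + 1, func_descrpt, full_doc
-- ===== Notes on version B (the rewrite author's own statement) =====
-- stated objective: simpler
-- what changed: Replaced A's two mutating append loops plus an if/else re-join branch with a single boundary-finding scan (closing-quote index j, first-blank index descr_end) followed by two slices and joins.
-- outside the precondition, e.g. on parse_multi_line_doc(-4, ['"""', 'b', 'x']): A returns (1, 'b x', 'bx'), B returns (1, '', '')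
import Mathlib
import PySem

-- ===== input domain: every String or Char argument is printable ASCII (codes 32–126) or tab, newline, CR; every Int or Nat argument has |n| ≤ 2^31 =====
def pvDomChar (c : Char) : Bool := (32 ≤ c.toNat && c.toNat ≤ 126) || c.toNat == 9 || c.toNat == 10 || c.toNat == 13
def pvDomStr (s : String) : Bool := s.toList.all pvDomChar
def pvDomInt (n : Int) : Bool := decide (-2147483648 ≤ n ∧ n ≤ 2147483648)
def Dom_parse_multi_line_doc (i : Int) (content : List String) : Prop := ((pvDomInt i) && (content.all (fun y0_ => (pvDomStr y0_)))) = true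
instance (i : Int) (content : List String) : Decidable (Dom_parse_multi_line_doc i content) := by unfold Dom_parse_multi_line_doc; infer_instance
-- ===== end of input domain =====

-- B replaces A's two mutating append loops + if/else with one boundary-finding scan
-- (closing-quote index and first blank index) followed by two slices and joins (objective: simpler).

-- ===== PORT A =====
-- A's second while loop: while content[i].strip() != '"""': full_doc.append(content[i]); i += 1; then return i+1, joins
def aLoop2 : Nat → List String → Int → List String → List String → Int × String × String
  | 0, _, _, _, _ => (0, "", "")      -- fuel exhausted: unreachable when Python returns
  | fuel+1, content, i, descr, doc =>
    match PySem.List.pyGet? content i with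
    | none => (0, "", "")             -- Python raises IndexError here (outside Pre_)
    | some line =>
      if PySem.Str.strip line = "\"\"\"" then
        (i + 1, PySem.Str.join " " descr, PySem.Str.join "" doc)
      else aLoop2 fuel content (i + 1) descr (doc ++ [line])

-- A's first while loop plus the blank/quote branch
def aLoop1 : Nat → List String → Int → List String → List String → Int × String × String
  | 0, _, _, _, _ => (0, "", "")
  | fuel+1, content, i, descr, doc =>
    match PySem.List.pyGet? content i with
    | none => (0, "", "")             -- IndexError (outside Pre_)
    | some line =>
      let s := PySem.Str.strip line
      if s ≠ "" ∧ s ≠ "\"\"\"" then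
        aLoop1 fuel content (i + 1) (descr ++ [s]) (doc ++ [line])
      else if s = "" then
        aLoop2 fuel content (i + 1) descr (doc ++ [line])
      else
        (i + 1, PySem.Str.join " " descr, PySem.Str.join "" doc)

def parse_multi_line_doc (i : Int) (content : List String) : Int × String × String :=
  aLoop1 (2 * content.length + 2) content (i + 2) [] []

-- ===== PORT B =====
-- B's single scan: advance j while content[j].strip() != '"""', recording the first blank line's index
def bLoop : Nat → List String → Int → Option Int → Option (Int × Option Int)
  | 0, _, _, _ => none
  | fuel+1, content, j, de =>
    match PySem.List.pyGet? content j with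
    | none => none                    -- IndexError (outside Pre_)
    | some line =>
      if PySem.Str.strip line = "\"\"\"" then some (j, de)
      else
        let de' := match de with
          | some b => some b
          | none => if PySem.Str.strip line = "" then some j else none
        bLoop fuel content (j + 1) de'

def parse_multi_line_doc_alt (i : Int) (content : List String) : Int × String × String :=
  match bLoop (2 * content.length + 2) content (i + 2) none with
  | none => (0, "", "")
  | some (j, de?) =>
    let de := de?.getD j
    let func_descrpt := PySem.Str.join " "
      ((PySem.List.slice content (some (i + 2)) (some de)).map PySem.Str.strip)
    let full_doc := PySem.Str.join "" (PySem.List.slice content (some (i + 2)) (some j))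
    (j + 1, func_descrpt, full_doc)

-- ===== PRECONDITION & SPEC =====
-- Pre_ excludes (a) inputs where A raises IndexError (the scan from i+2 runs off the list without
-- meeting a closing '"""' line), and (b) inputs with i+2 < 0 whose scan wraps past index 0, where
-- A's result is an accident of Python's negative-index wraparound (doc stitched from tail-then-head
-- lines) that B's slice-based reading cannot and should not reproduce.
def Pre_parse_multi_line_doc (i : Int) (content : List String) : Prop :=
  (0 ≤ i + 2 ∧ ∃ j < content.length, i + 2 ≤ (j : Int) ∧ PySem.Str.strip (content.getD j "") = "\"\"\"")
  ∨ (i + 2 < 0 ∧ -(content.length : Int) ≤ i + 2 ∧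
      ∃ j < content.length, i + 2 + content.length ≤ (j : Int) ∧ PySem.Str.strip (content.getD j "") = "\"\"\"")
instance (i : Int) (content : List String) : Decidable (Pre_parse_multi_line_doc i content) := by
  unfold Pre_parse_multi_line_doc; infer_instance

def pvWitness_parse_multi_line_doc : Int × List String :=
  (0, ["def f():\n", "\"\"\"\n", "desc line\n", "\n", "more doc\n", "\"\"\"\n"])

def Spec_parse_multi_line_doc (i : Int) (content : List String) (out : Int × String × String) : Prop := out = parse_multi_line_doc_alt i content
instance (i : Int) (content : List String) (out : Int × String × String) : Decidable (Spec_parse_multi_line_doc i content out) := by unfold Spec_parse_multi_line_doc; infer_instance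

-- ===== CLAIM (what is proved, stated in full; the proofs are below) =====
def Claim_equal_parse_multi_line_doc : Prop := ∀ (i : Int) (content : List String), Dom_parse_multi_line_doc i content → Pre_parse_multi_line_doc i content → Spec_parse_multi_line_doc i content (parse_multi_line_doc i content)

-- ===== LEMMAS AND PROOFS =====

-- first index k ≥ j whose stripped line is the closing quote (content.length if none)
def fq (content : List String) (j : Nat) : Nat :=
  if h : j < content.length then
    (if PySem.Str.strip content[j] = "\"\"\"" then j else fq content (j + 1))
  else content.length
termination_by content.length - j

-- first index k ≥ j whose stripped line is blank or the closing quote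
def fs (content : List String) (j : Nat) : Nat :=
  if h : j < content.length then
    (if PySem.Str.strip content[j] = "" ∨ PySem.Str.strip content[j] = "\"\"\"" then j
     else fs content (j + 1))
  else content.length
termination_by content.length - j

def sliceN (content : List String) (a b : Nat) : List String := (content.drop a).take (b - a)


theorem le_fq (content : List String) (j : Nat) (hj : j ≤ content.length) : j ≤ fq content j := by
  rw [fq]
  split
  next h =>
    split
    · exact le_refl j
    · have := le_fq content (j + 1) (by omega); omega
  next h => omega
termination_by content.length - j

theorem le_fs (content : List String) (j : Nat) (hj : j ≤ content.length) : j ≤ fs content j := by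
  rw [fs]
  split
  next h =>
    split
    · exact le_refl j
    · have := le_fs content (j + 1) (by omega); omega
  next h => omega
termination_by content.length - j

theorem fs_le_fq (content : List String) (j : Nat) : fs content j ≤ fq content j := by
  rw [fs, fq]
  split
  next h =>
    by_cases hq : PySem.Str.strip content[j] = "\"\"\""
    · simp [hq]
    · by_cases hb : PySem.Str.strip content[j] = ""
      · simp [hq, hb]
        exact le_trans (by omega) (le_fq content (j + 1) (by omega))
      · simp [hq, hb]
        exact fs_le_fq content (j + 1)
  next h => exact le_refl _
termination_by content.length - j

theorem fq_lt_of_exists (content : List String) (j : Nat)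
    (h : ∃ k, j ≤ k ∧ k < content.length ∧ PySem.Str.strip (content.getD k "") = "\"\"\"") :
    fq content j < content.length := by
  obtain ⟨k, hjk, hk, hq⟩ := h
  rw [List.getD_eq_getElem content "" hk] at hq
  rw [fq]
  have hjlen : j < content.length := Nat.lt_of_le_of_lt hjk hk
  simp only [hjlen, dite_true, dif_pos]
  by_cases hqj : PySem.Str.strip content[j] = "\"\"\""
  · simp [hqj, hjlen]
  · have hne : j ≠ k := by rintro rfl; exact hqj hq
    simp only [hqj, if_false]
    exact fq_lt_of_exists content (j + 1) ⟨k, by omega, hk, by rw [List.getD_eq_getElem content "" hk]; exact hq⟩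
termination_by content.length - j

theorem sliceN_cons (content : List String) (a b : Nat) (ha : a < content.length) (hab : a < b) :
    sliceN content a b = content[a] :: sliceN content (a + 1) b := by
  rw [sliceN, sliceN, List.drop_eq_getElem_cons ha]
  have h : b - a = (b - (a + 1)) + 1 := by omega
  rw [h, List.take_succ_cons]

theorem pyGet_hz (content : List String) (j : Nat) (hj : j < content.length) (z : Int)
    (hz : z = (j : Int) ∨ z = (j : Int) - content.length) :
    PySem.List.pyGet? content z = some content[j] := by
  rcases hz with h | h
  · rw [h, PySem.List.pyGet?_natCast, List.getElem?_eq_getElem hj]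
  · have hk : z = -(((content.length - j : Nat)) : Int) := by push_cast; omega
    rw [hk, PySem.List.pyGet?_neg_natCast content (content.length - j) (by omega) (by omega)]
    have : content.length - (content.length - j) = j := by omega
    rw [this, List.getElem?_eq_getElem hj]

theorem hz_succ (content : List String) (j : Nat) (z : Int)
    (hz : z = (j : Int) ∨ z = (j : Int) - content.length) :
    z + 1 = ((j + 1 : Nat) : Int) ∨ z + 1 = ((j + 1 : Nat) : Int) - content.length := by
  rcases hz with h | h
  · left; push_cast; omega
  · right; push_cast; omega

theorem aLoop2_eq (content : List String) :
    ∀ (fuel : Nat) (j : Nat) (z : Int) (descr doc : List String),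
      (z = (j : Int) ∨ z = (j : Int) - content.length) →
      content.length - j < fuel → fq content j < content.length →
      aLoop2 fuel content z descr doc =
        (z + ((fq content j : Int) - j) + 1, PySem.Str.join " " descr,
          PySem.Str.join "" (doc ++ sliceN content j (fq content j))) := by
  intro fuel
  induction fuel with
  | zero => intro j z descr doc hz hf hq; omega
  | succ f ih =>
    intro j z descr doc hz hf hq
    have hjlen : j < content.length := by
      by_contra h
      rw [fq] at hq; simp [h] at hq
    simp only [aLoop2, pyGet_hz content j hjlen z hz]
    by_cases hqj : PySem.Str.strip content[j] = "\"\"\""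
    · have hfqj : fq content j = j := by rw [fq]; simp [hjlen, hqj]
      simp [hqj, hfqj, sliceN]
    · have hfqj : fq content j = fq content (j + 1) := by rw [fq]; simp [hjlen, hqj]
      have hlt : j < fq content j := by
        have := le_fq content (j + 1) (by omega)
        omega
      simp only [hqj, if_false]
      rw [ih (j + 1) (z + 1) descr (doc ++ [content[j]]) (hz_succ content j z hz) (by omega)
        (by rw [← hfqj]; exact hq)]
      have har : z + 1 + ((fq content (j + 1) : Int) - ((j + 1 : Nat) : Int)) =
          z + ((fq content (j + 1) : Int) - (j : Int)) := by push_cast; ring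
      rw [har, ← hfqj, sliceN_cons content j (fq content j) hjlen hlt]
      simp

theorem aLoop1_eq (content : List String) :
    ∀ (fuel : Nat) (j : Nat) (z : Int) (descr doc : List String),
      (z = (j : Int) ∨ z = (j : Int) - content.length) →
      content.length - j < fuel → fq content j < content.length →
      aLoop1 fuel content z descr doc =
        (z + ((fq content j : Int) - j) + 1,
          PySem.Str.join " " (descr ++ (sliceN content j (fs content j)).map PySem.Str.strip),
          PySem.Str.join "" (doc ++ sliceN content j (fq content j))) := by
  intro fuel
  induction fuel with
  | zero => intro j z descr doc hz hf hq; omega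
  | succ f ih =>
    intro j z descr doc hz hf hq
    have hjlen : j < content.length := by
      by_contra h
      rw [fq] at hq; simp [h] at hq
    simp only [aLoop1, pyGet_hz content j hjlen z hz]
    by_cases hqj : PySem.Str.strip content[j] = "\"\"\""
    · have hfqj : fq content j = j := by rw [fq]; simp [hjlen, hqj]
      have hfsj : fs content j = j := by rw [fs]; simp [hjlen, hqj]
      simp [hqj, hfqj, hfsj, sliceN]
    · by_cases hbj : PySem.Str.strip content[j] = ""
      · have hfqj : fq content j = fq content (j + 1) := by rw [fq]; simp [hjlen, hqj]
        have hfsj : fs content j = j := by rw [fs]; simp [hjlen, hbj]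
        have hlt : j < fq content j := by
          have := le_fq content (j + 1) (by omega)
          omega
        simp only [hbj, hqj, ne_eq, not_true_eq_false, false_and, if_false, if_true, ite_true]
        rw [aLoop2_eq content f (j + 1) (z + 1) descr (doc ++ [content[j]])
          (hz_succ content j z hz) (by omega) (by rw [← hfqj]; exact hq)]
        have har : z + 1 + ((fq content (j + 1) : Int) - ((j + 1 : Nat) : Int)) =
            z + ((fq content (j + 1) : Int) - (j : Int)) := by push_cast; ring
        rw [har, ← hfqj, sliceN_cons content j (fq content j) hjlen hlt, hfsj]
        simp [sliceN]
      · have hfqj : fq content j = fq content (j + 1) := by rw [fq]; simp [hjlen, hqj]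
        have hfsj : fs content j = fs content (j + 1) := by rw [fs]; simp [hjlen, hqj, hbj]
        have hltq : j < fq content j := by
          have := le_fq content (j + 1) (by omega)
          omega
        have hlts : j < fs content j := by
          have := le_fs content (j + 1) (by omega)
          omega
        simp only [hbj, hqj, ne_eq, not_false_eq_true, and_self, ite_true]
        rw [ih (j + 1) (z + 1) (descr ++ [PySem.Str.strip content[j]]) (doc ++ [content[j]])
          (hz_succ content j z hz) (by omega) (by rw [← hfqj]; exact hq)]
        have har : z + 1 + ((fq content (j + 1) : Int) - ((j + 1 : Nat) : Int)) =
            z + ((fq content (j + 1) : Int) - (j : Int)) := by push_cast; ring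
        rw [har, ← hfqj, ← hfsj, sliceN_cons content j (fq content j) hjlen hltq,
          sliceN_cons content j (fs content j) hjlen hlts]
        simp

theorem bLoop_some_eq (content : List String) :
    ∀ (fuel : Nat) (j : Nat) (z : Int) (b : Int),
      (z = (j : Int) ∨ z = (j : Int) - content.length) →
      content.length - j < fuel → fq content j < content.length →
      bLoop fuel content z (some b) = some (z + ((fq content j : Int) - j), some b) := by
  intro fuel
  induction fuel with
  | zero => intro j z b hz hf hq; omega
  | succ f ih =>
    intro j z b hz hf hq
    have hjlen : j < content.length := by
      by_contra h
      rw [fq] at hq; simp [h] at hq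
    simp only [bLoop, pyGet_hz content j hjlen z hz]
    by_cases hqj : PySem.Str.strip content[j] = "\"\"\""
    · have hfqj : fq content j = j := by rw [fq]; simp [hjlen, hqj]
      simp [hqj, hfqj]
    · have hfqj : fq content j = fq content (j + 1) := by rw [fq]; simp [hjlen, hqj]
      simp only [hqj, if_false]
      rw [ih (j + 1) (z + 1) b (hz_succ content j z hz) (by omega) (by rw [← hfqj]; exact hq)]
      have har : z + 1 + ((fq content (j + 1) : Int) - ((j + 1 : Nat) : Int)) =
          z + ((fq content (j + 1) : Int) - (j : Int)) := by push_cast; ring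
      rw [har, ← hfqj]

theorem bLoop_none_eq (content : List String) :
    ∀ (fuel : Nat) (j : Nat) (z : Int),
      (z = (j : Int) ∨ z = (j : Int) - content.length) →
      content.length - j < fuel → fq content j < content.length →
      bLoop fuel content z none =
        some (z + ((fq content j : Int) - j),
          if fs content j < fq content j then some (z + ((fs content j : Int) - j)) else none) := by
  intro fuel
  induction fuel with
  | zero => intro j z hz hf hq; omega
  | succ f ih =>
    intro j z hz hf hq
    have hjlen : j < content.length := by
      by_contra h
      rw [fq] at hq; simp [h] at hq
    simp only [bLoop, pyGet_hz content j hjlen z hz]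
    by_cases hqj : PySem.Str.strip content[j] = "\"\"\""
    · have hfqj : fq content j = j := by rw [fq]; simp [hjlen, hqj]
      have hfsj : fs content j = j := by rw [fs]; simp [hjlen, hqj]
      simp [hqj, hfqj, hfsj]
    · have hfqj : fq content j = fq content (j + 1) := by rw [fq]; simp [hjlen, hqj]
      by_cases hbj : PySem.Str.strip content[j] = ""
      · have hfsj : fs content j = j := by rw [fs]; simp [hjlen, hbj]
        have hlt : j < fq content j := by
          have := le_fq content (j + 1) (by omega)
          omega
        simp only [hqj, hbj, if_false, ite_true]
        rw [bLoop_some_eq content f (j + 1) (z + 1) z (hz_succ content j z hz) (by omega)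
          (by rw [← hfqj]; exact hq)]
        have har : z + 1 + ((fq content (j + 1) : Int) - ((j + 1 : Nat) : Int)) =
            z + ((fq content (j + 1) : Int) - (j : Int)) := by push_cast; ring
        rw [har, ← hfqj, hfsj]
        have har2 : z + ((j : Int) - (j : Int)) = z := by ring
        simp [hlt, har2]
      · have hfsj : fs content j = fs content (j + 1) := by rw [fs]; simp [hjlen, hqj, hbj]
        simp only [hqj, hbj, if_false, ite_false]
        rw [ih (j + 1) (z + 1) (hz_succ content j z hz) (by omega) (by rw [← hfqj]; exact hq)]
        have h1 : z + 1 + ((fq content (j + 1) : Int) - ((j + 1 : Nat) : Int)) =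
            z + ((fq content (j + 1) : Int) - (j : Int)) := by push_cast; ring
        have h2 : z + 1 + ((fs content (j + 1) : Int) - ((j + 1 : Nat) : Int)) =
            z + ((fs content (j + 1) : Int) - (j : Int)) := by push_cast; ring
        rw [h1, h2, ← hfqj, ← hfsj]

theorem sliceNeg (content : List String) (a b : Nat) (ha : a < content.length)
    (hb : b < content.length) :
    PySem.List.slice content (some ((a : Int) - content.length)) (some ((b : Int) - content.length)) =
      sliceN content a b := by
  have h1 : (a : Int) - content.length = -(((content.length - a : Nat)) : Int) := by push_cast; omega
  have h2 : (b : Int) - content.length = -(((content.length - b : Nat)) : Int) := by push_cast; omega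
  rw [h1, h2]
  rw [PySem.List.slice, PySem.List.clampIdx_neg_natCast content.length (content.length - a) (by omega),
    PySem.List.clampIdx_neg_natCast content.length (content.length - b) (by omega)]
  have h3 : content.length - (content.length - a) = a := by omega
  rw [h3]
  have h4 : content.length - (content.length - b) - a = b - a := by omega
  rw [h4]
  rfl

-- ===== VERDICT (by name: the statement is the Claim_ definition above) =====
theorem parse_multi_line_doc_spec : Claim_equal_parse_multi_line_doc := by
  intro i content _ hpre
  unfold Spec_parse_multi_line_doc parse_multi_line_doc parse_multi_line_doc_alt
  rcases hpre with ⟨hi, j, hjlen, hij, hq⟩ | ⟨hi, hlen, j, hjlen, hij, hq⟩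
  · -- nonnegative start: z = (i+2) = ↑s
    set s : Nat := (i + 2).toNat with hs_def
    have hs : (i + 2 : Int) = (s : Int) := (Int.toNat_of_nonneg hi).symm
    have hsj : s ≤ j := by omega
    have hfq : fq content s < content.length := fq_lt_of_exists content s ⟨j, hsj, hjlen, hq⟩
    have hz : (i + 2 : Int) = ((s : Nat) : Int) ∨ (i + 2 : Int) = ((s : Nat) : Int) - content.length :=
      Or.inl hs
    rw [aLoop1_eq content (2 * content.length + 2) s (i + 2) [] [] hz (by omega) hfq]
    rw [bLoop_none_eq content (2 * content.length + 2) s (i + 2) hz (by omega) hfq]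
    have hA : (i + 2 : Int) + ((fq content s : Int) - s) = (fq content s : Int) := by omega
    have hB : (i + 2 : Int) + ((fs content s : Int) - s) = (fs content s : Int) := by omega
    rw [hA, hB]
    have hsl : ∀ e : Nat, PySem.List.slice content (some (i + 2)) (some ((e : Int))) =
        sliceN content s e := by
      intro e
      rw [hs, PySem.List.slice_natCast]
      rfl
    by_cases hlt : fs content s < fq content s
    · simp only [hlt, ite_true, Option.getD_some]
      rw [hsl, hsl]
      simp
    · have heq : fs content s = fq content s := le_antisymm (fs_le_fq content s) (by omega)
      simp only [hlt, ite_false, Option.getD_none]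
      rw [hsl, heq]
      simp
  · -- negative start: z = (i+2) = ↑s0 - len
    set s0 : Nat := (i + 2 + content.length).toNat with hs0_def
    have hs0 : (i + 2 : Int) = (s0 : Int) - content.length := by omega
    have hs0j : s0 ≤ j := by omega
    have hfq : fq content s0 < content.length := fq_lt_of_exists content s0 ⟨j, hs0j, hjlen, hq⟩
    have hz : (i + 2 : Int) = ((s0 : Nat) : Int) ∨ (i + 2 : Int) = ((s0 : Nat) : Int) - content.length :=
      Or.inr hs0
    have hs0len : s0 < content.length := by omega
    rw [aLoop1_eq content (2 * content.length + 2) s0 (i + 2) [] [] hz (by omega) hfq]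
    rw [bLoop_none_eq content (2 * content.length + 2) s0 (i + 2) hz (by omega) hfq]
    have hA : (i + 2 : Int) + ((fq content s0 : Int) - s0) = (fq content s0 : Int) - content.length := by
      omega
    have hB : (i + 2 : Int) + ((fs content s0 : Int) - s0) = (fs content s0 : Int) - content.length := by
      omega
    rw [hA, hB]
    have hsl : ∀ e : Nat, e < content.length →
        PySem.List.slice content (some (i + 2)) (some ((e : Int) - content.length)) =
          sliceN content s0 e := by
      intro e he
      rw [hs0]
      exact sliceNeg content s0 e hs0len he
    by_cases hlt : fs content s0 < fq content s0
    · have hfs_lt : fs content s0 < content.length := lt_of_le_of_lt (fs_le_fq content s0) hfq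
      simp only [hlt, ite_true, Option.getD_some]
      rw [hsl _ hfs_lt, hsl _ hfq]
      simp
    · have heq : fs content s0 = fq content s0 := le_antisymm (fs_le_fq content s0) (by omega)
      simp only [hlt, ite_false, Option.getD_none]
      rw [hsl _ hfq, heq]
      simp
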